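-- pv_equiv track=rewrite | github.com/ZeL1k7/hack-fu | src/data/find_labels2.py | ngram_words_compare
-- ===== SOURCE A (Python) =====
-- def ngram_words_compare(words1:list, words2:list):
--     score = 0
--     for i in range(1, len(words1) + 1):
--         n = i
--         # n-gram
--         ngram1 = [words1[i:i+n] for i in range(len(words1)-n+1)]
--         ngram2 = [words2[i:i+n] for i in range(len(words2)-n+1)]
--
--         for ngram in ngram1:
--             if ngram in ngram2:
--                 score += 1*len(ngram)
--     return score
-- ===== SOURCE B (Python) =====
-- def ngram_words_compare(words1: list, words2: list):
--     # Suffix DP: run[j] = length of the longest common run of words1[i:] and words2[j:],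
--     # filled from the last i upward.  Each start i contributes m*(m+1)//2 where
--     # m = max over j, since an n-gram that occurs keeps occurring for all shorter lengths.
--     L2 = len(words2)
--     score = 0
--     nxt = [0] * (L2 + 1)
--     for i in range(len(words1) - 1, -1, -1):
--         cur = [nxt[j + 1] + 1 if words1[i] == words2[j] else 0 for j in range(L2)] + [0]
--         m = max(cur)
--         score += m * (m + 1) // 2
--         nxt = cur
--     return score
-- ===== Notes on version B (the rewrite author's own statement) =====
-- stated objective: faster
-- what changed: Instead of re-enumerating both n-gram lists and scanning for membership for every length n, B runs a suffix DP (longest-common-run table row by row) to get, for each start of words1, the longest run matching anywhere in words2, and adds its triangular number m*(m+1)//2, since an n-gram match is monotone in the length.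
import Mathlib
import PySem

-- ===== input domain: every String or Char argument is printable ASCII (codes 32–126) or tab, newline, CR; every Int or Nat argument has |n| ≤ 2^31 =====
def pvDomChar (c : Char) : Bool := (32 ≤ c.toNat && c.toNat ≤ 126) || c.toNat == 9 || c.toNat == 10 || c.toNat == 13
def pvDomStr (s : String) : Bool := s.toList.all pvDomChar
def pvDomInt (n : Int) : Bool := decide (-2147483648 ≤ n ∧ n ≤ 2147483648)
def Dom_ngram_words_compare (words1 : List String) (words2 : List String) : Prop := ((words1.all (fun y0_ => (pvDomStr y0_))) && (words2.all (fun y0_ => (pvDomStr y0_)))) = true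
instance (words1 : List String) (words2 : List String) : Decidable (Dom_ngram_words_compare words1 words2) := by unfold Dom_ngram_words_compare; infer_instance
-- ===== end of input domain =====

-- B replaces A's three-level sweep (per n-gram length, per start, membership scan in a rebuilt
-- n-gram list) by a suffix DP computing the longest matching run per start of words1 and adding
-- its triangular number (all matching lengths 1..m at once); objective: faster (measured).

-- ===== PORT A =====
def ngram_words_compare (words1 : List String) (words2 : List String) : Int :=
  (PySem.List.pyRange 1 ((words1.length : Int) + 1) 1).foldl (fun score i =>
    let n := i
    let ngram1 := (PySem.List.pyRange 0 ((words1.length : Int) - n + 1) 1).map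
      (fun i => PySem.List.slice words1 (some i) (some (i + n)))
    let ngram2 := (PySem.List.pyRange 0 ((words2.length : Int) - n + 1) 1).map
      (fun i => PySem.List.slice words2 (some i) (some (i + n)))
    ngram1.foldl (fun score ngram =>
      if ngram ∈ ngram2 then score + 1 * (ngram.length : Int) else score) score) 0

-- ===== PORT B =====
-- one step of B's loop body (the for-body over i; state = (score, nxt))
def pvStep (words1 words2 : List String) (st : Int × List Nat) (i : Int) : Int × List Nat :=
  let nxt := st.2
  let cur := ((PySem.List.pyRange 0 (words2.length : Int) 1).map (fun j =>
      if PySem.List.pyGetD words1 i "" = PySem.List.pyGetD words2 j "" then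
        PySem.List.pyGetD nxt (j + 1) 0 + 1
      else 0)) ++ [0]
  -- max(cur): cur always ends in the sentinel 0, so max? is some and the getD default is never read
  let m := (PySem.List.max? cur (fun x => x)).getD 0
  (st.1 + ((m * (m + 1) / 2 : Nat) : Int), cur)

def ngram_words_compare_alt (words1 : List String) (words2 : List String) : Int :=
  ((PySem.List.pyRange ((words1.length : Int) - 1) (-1) (-1)).foldl
    (pvStep words1 words2) (0, List.replicate (words2.length + 1) 0)).1

-- ===== PRECONDITION & SPEC =====
def Spec_ngram_words_compare (words1 : List String) (words2 : List String) (out : Int) : Prop := out = ngram_words_compare_alt words1 words2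
instance (words1 : List String) (words2 : List String) (out : Int) : Decidable (Spec_ngram_words_compare words1 words2 out) := by unfold Spec_ngram_words_compare; infer_instance

-- ===== CLAIM (what is proved, stated in full; the proofs are below) =====
def Claim_equal_ngram_words_compare : Prop := ∀ (words1 : List String) (words2 : List String), Dom_ngram_words_compare words1 words2 → Spec_ngram_words_compare words1 words2 (ngram_words_compare words1 words2)

-- ===== LEMMAS AND PROOFS =====

-- common prefix length of two lists (the run length the DP rows tabulate)
def pvCpl : List String → List String → Nat
  | x :: xs, y :: ys => if x = y then pvCpl xs ys + 1 else 0
  | _, _ => 0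

-- longest match starting at position i of w1 against any start position of w2
def pvMi (w1 w2 : List String) (i : Nat) : Nat :=
  ((List.range w2.length).map (fun j => pvCpl (w1.drop i) (w2.drop j))).foldl max 0

theorem pvCpl_le_left (xs ys : List String) : pvCpl xs ys ≤ xs.length := by
  induction xs generalizing ys with
  | nil => cases ys <;> simp [pvCpl]
  | cons x xs ih =>
    cases ys with
    | nil => simp [pvCpl]
    | cons y ys =>
      simp only [pvCpl]
      split_ifs
      · have := ih ys; simp; omega
      · simp

theorem pvCpl_ge_iff (n : Nat) (xs ys : List String) :
    n ≤ pvCpl xs ys ↔ n ≤ xs.length ∧ n ≤ ys.length ∧ xs.take n = ys.take n := by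
  induction xs generalizing ys n with
  | nil => cases ys <;> simp [pvCpl] <;> omega
  | cons x xs ih =>
    cases ys with
    | nil => simp [pvCpl]; omega
    | cons y ys =>
      cases n with
      | zero => simp
      | succ n =>
        simp only [pvCpl, List.take_succ_cons, List.length_cons]
        by_cases h : x = y
        · simp only [h, if_true]
          constructor
          · intro hle
            have := (ih n ys).mp (by omega)
            exact ⟨by omega, by omega, by rw [this.2.2]⟩
          · rintro ⟨a, b, c⟩
            rw [List.cons_eq_cons] at c
            have := (ih n ys).mpr ⟨by omega, by omega, c.2⟩
            omega
        · simp only [h, if_false]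
          constructor
          · omega
          · rintro ⟨a, b, c⟩
            rw [List.cons_eq_cons] at c
            exact absurd c.1 h

theorem pvMi_le (w1 w2 : List String) (i : Nat) : pvMi w1 w2 i ≤ w1.length - i := by
  unfold pvMi
  rcases PySem.List.foldl_max_mem ((List.range w2.length).map (fun j => pvCpl (w1.drop i) (w2.drop j))) 0 with h | h
  · omega
  · rcases List.mem_map.1 h with ⟨j, _, hj⟩
    rw [← hj]
    have := pvCpl_le_left (w1.drop i) (w2.drop j)
    simp [List.length_drop] at this ⊢
    omega

theorem le_pvMi_iff (w1 w2 : List String) (i n : Nat) :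
    n + 1 ≤ pvMi w1 w2 i ↔ ∃ j < w2.length, n + 1 ≤ pvCpl (w1.drop i) (w2.drop j) := by
  unfold pvMi
  constructor
  · intro hle
    rcases PySem.List.foldl_max_mem ((List.range w2.length).map (fun j => pvCpl (w1.drop i) (w2.drop j))) 0 with h | h
    · omega
    · rcases List.mem_map.1 h with ⟨j, hjr, hj⟩
      exact ⟨j, List.mem_range.1 hjr, by omega⟩
  · rintro ⟨j, hj, hle⟩
    have hm : pvCpl (w1.drop i) (w2.drop j) ∈ (List.range w2.length).map (fun j => pvCpl (w1.drop i) (w2.drop j)) :=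
      List.mem_map.2 ⟨j, List.mem_range.2 hj, rfl⟩
    have := (PySem.List.le_foldl_max ((List.range w2.length).map (fun j => pvCpl (w1.drop i) (w2.drop j))) 0).2 _ hm
    omega

def pvRow (w1 w2 : List String) (i : Nat) : List Nat :=
  (List.range (w2.length + 1)).map (fun j => pvCpl (w1.drop i) (w2.drop j))

theorem pvCpl_nil_right (xs : List String) : pvCpl xs [] = 0 := by
  cases xs <;> simp [pvCpl]

theorem pvCpl_nil_left (ys : List String) : pvCpl [] ys = 0 := by
  cases ys <;> simp [pvCpl]

theorem pv_max_append_zero (l : List Nat) :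
    (PySem.List.max? (l ++ [0]) (fun x => x)).getD 0 = l.foldl max 0 := by
  cases l with
  | nil => simp [PySem.List.max?]
  | cons x t =>
    rw [List.cons_append, PySem.List.max?_id_cons, List.foldl_append]
    simp

theorem pyRange_zero_nat_map (n : Nat) :
    PySem.List.pyRange 0 (n:Int) 1 = List.map (Nat.cast : Nat → Int) (List.range n) := by
  simp [PySem.List.pyRange_zero_natCast, List.map_eq_flatMap]

theorem pvRow_top (w1 w2 : List String) : pvRow w1 w2 w1.length = List.replicate (w2.length + 1) 0 := by
  unfold pvRow
  rw [List.eq_replicate_iff]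
  constructor
  · simp
  · intro b hb
    rcases List.mem_map.1 hb with ⟨j, _, hj⟩
    rw [← hj, List.drop_length, pvCpl_nil_left]

theorem pvStep_row (w1 w2 : List String) (i : Nat) (hi : i < w1.length) (S : Int) :
    pvStep w1 w2 (S, pvRow w1 w2 (i + 1)) ((i : Nat) : Int)
      = (S + ((pvMi w1 w2 i * (pvMi w1 w2 i + 1) / 2 : Nat) : Int), pvRow w1 w2 i) := by
  unfold pvStep
  have hcur : ((PySem.List.pyRange 0 (w2.length : Int) 1).map (fun j =>
      if PySem.List.pyGetD w1 ((i:Nat):Int) "" = PySem.List.pyGetD w2 j "" then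
        PySem.List.pyGetD (pvRow w1 w2 (i+1)) (j + 1) 0 + 1
      else 0)) ++ [0]
      = pvRow w1 w2 i := by
    rw [pyRange_zero_nat_map w2.length, List.map_map]
    conv_rhs => rw [pvRow, List.range_succ, List.map_append]
    congr 1
    · apply List.map_congr_left
      intro j hj
      rw [List.mem_range] at hj
      simp only [Function.comp_apply]
      have hj1 : ((j:Nat):Int) + 1 = (((j+1:Nat)):Int) := by push_cast; ring
      rw [PySem.List.pyGetD_natCast, PySem.List.pyGetD_natCast, hj1, PySem.List.pyGetD_natCast]
      have hrow : (pvRow w1 w2 (i+1)).getD (j+1) 0 = pvCpl (w1.drop (i+1)) (w2.drop (j+1)) := by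
        unfold pvRow
        rw [List.getD_eq_getElem?_getD, List.getElem?_map]
        simp [List.getElem?_range (by omega : j + 1 < w2.length + 1)]
      rw [hrow]
      have hd1 : w1.drop i = w1[i] :: w1.drop (i+1) := List.drop_eq_getElem_cons hi
      have hd2 : w2.drop j = w2[j] :: w2.drop (j+1) := List.drop_eq_getElem_cons hj
      rw [hd1, hd2]
      simp only [pvCpl]
      rw [List.getD_eq_getElem?_getD, List.getElem?_eq_getElem hi,
          List.getD_eq_getElem?_getD, List.getElem?_eq_getElem hj]
      rfl
    · simp [List.drop_length, pvCpl_nil_right]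
  simp only [hcur]
  have hm : (PySem.List.max? (pvRow w1 w2 i) (fun x => x)).getD 0 = pvMi w1 w2 i := by
    unfold pvRow
    rw [List.range_succ, List.map_append]
    have : (List.map (fun j => pvCpl (w1.drop i) (w2.drop j)) [w2.length]) = [0] := by
      simp [List.drop_length, pvCpl_nil_right]
    rw [this, pv_max_append_zero]
    rfl
  rw [hm]

theorem pvB_loop (w1 w2 : List String) (n : Nat) (hn : n ≤ w1.length) :
    (((List.range n).map (fun (k : Nat) => ((w1.length : Int) - 1 - (k:Int)))).foldl
        (pvStep w1 w2) (0, List.replicate (w2.length + 1) 0))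
      = (∑ k ∈ Finset.range n, ((pvMi w1 w2 (w1.length - 1 - k) * (pvMi w1 w2 (w1.length - 1 - k) + 1) / 2 : Nat) : Int),
         pvRow w1 w2 (w1.length - n)) := by
  induction n with
  | zero =>
    rw [List.range_zero, List.map_nil, List.foldl_nil, Finset.range_zero, Finset.sum_empty,
        Nat.sub_zero, pvRow_top]
  | succ n ih =>
    rw [List.range_succ, List.map_append, List.foldl_append, ih (by omega)]
    simp only [List.map_cons, List.map_nil, List.foldl_cons, List.foldl_nil]
    have hi : w1.length - 1 - n < w1.length := by omega
    have hcast : (w1.length : Int) - 1 - (n:Int) = ((w1.length - 1 - n : Nat) : Int) := by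
      omega
    have hsucc : w1.length - 1 - n + 1 = w1.length - n := by omega
    rw [hcast, ← hsucc, pvStep_row w1 w2 (w1.length - 1 - n) hi]
    rw [Finset.sum_range_succ, show w1.length - (n+1) = w1.length - 1 - n from by omega]

theorem pvB_eq_sum (w1 w2 : List String) :
    ngram_words_compare_alt w1 w2 =
      ∑ i ∈ Finset.range w1.length, ((pvMi w1 w2 i * (pvMi w1 w2 i + 1) / 2 : Nat) : Int) := by
  unfold ngram_words_compare_alt
  rw [PySem.List.pyRange_neg_one]
  have ht : (((w1.length : Int) - 1) - (-1)).toNat = w1.length := by omega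
  rw [ht]
  have := pvB_loop w1 w2 w1.length le_rfl
  rw [show (fun (k : Nat) => (w1.length : Int) - 1 - (k:Int)) = (fun (k : Nat) => ((w1.length : Int) - 1) - (k:Int)) from rfl] at this
  rw [this]
  exact Finset.sum_range_reflect (fun i => ((pvMi w1 w2 i * (pvMi w1 w2 i + 1) / 2 : Nat) : Int)) w1.length

-- the n-gram list [w[i:i+n] for i in range(len(w)-n+1)], with n = k+1, in drop/take form
theorem pv_ngrams_eq (w : List String) (k : Nat) :
    (PySem.List.pyRange 0 ((w.length : Int) - (1 + (k:Int)) + 1) 1).map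
      (fun i => PySem.List.slice w (some i) (some (i + (1 + (k:Int))))) =
    (List.range (w.length - k)).map (fun i => (w.drop i).take (k + 1)) := by
  have hb : (w.length : Int) - (1 + (k:Int)) + 1 = (w.length : Int) - (k : Int) := by ring
  rw [hb, PySem.List.pyRange_one, List.map_map]
  have hn : (((w.length : Int) - (k:Int)) - 0).toNat = w.length - k := by
    rw [sub_zero]; exact Int.toNat_sub w.length k
  rw [hn]
  apply List.map_congr_left
  intro j hj
  simp only [Function.comp_apply]
  have h1 : (0 : Int) + (j:Int) = ((j:Nat):Int) := by omega
  rw [h1]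
  have h2 : (j:Int) + (1 + (k:Int)) = ((j:Nat):Int) + (((k+1):Nat):Int) := by
    push_cast; ring
  rw [h2, PySem.List.slice_natCast_add]

theorem pv_mem_iff (w1 w2 : List String) (k i : Nat) (hi : i + (k+1) ≤ w1.length) :
    ((w1.drop i).take (k+1) ∈ (List.range (w2.length - k)).map (fun j => (w2.drop j).take (k+1)))
      ↔ k + 1 ≤ pvMi w1 w2 i := by
  rw [le_pvMi_iff]
  simp only [List.mem_map, List.mem_range]
  constructor
  · rintro ⟨j, hj, heq⟩
    refine ⟨j, by omega, ?_⟩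
    rw [pvCpl_ge_iff]
    refine ⟨by simp; omega, by simp; omega, ?_⟩
    exact heq.symm
  · rintro ⟨j, hjL, hc⟩
    rw [pvCpl_ge_iff] at hc
    obtain ⟨h1, h2, h3⟩ := hc
    simp only [List.length_drop] at h1 h2
    exact ⟨j, by omega, h3.symm⟩

theorem pvA_eq_sum (w1 w2 : List String) :
    ngram_words_compare w1 w2 =
      ∑ k ∈ Finset.range w1.length, ∑ i ∈ Finset.range (w1.length - k),
        (if k + 1 ≤ pvMi w1 w2 i then ((k : Int) + 1) else 0) := by
  unfold ngram_words_compare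
  have hr : PySem.List.pyRange 1 ((w1.length : Int) + 1) 1
      = List.map (fun k : Nat => 1 + (k:Int)) (List.range w1.length) := by
    rw [PySem.List.pyRange_one]
    norm_num
  rw [hr, List.foldl_map]
  have hbody : ∀ (s : Int), ∀ k ∈ List.range w1.length,
      (fun (score : Int) (n : Int) =>
        let ngram1 := (PySem.List.pyRange 0 ((w1.length : Int) - n + 1) 1).map
          (fun i => PySem.List.slice w1 (some i) (some (i + n)))
        let ngram2 := (PySem.List.pyRange 0 ((w2.length : Int) - n + 1) 1).map
          (fun i => PySem.List.slice w2 (some i) (some (i + n)))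
        ngram1.foldl (fun score ngram =>
          if ngram ∈ ngram2 then score + 1 * (ngram.length : Int) else score) score) s (1 + (k:Int))
      = s + ∑ i ∈ Finset.range (w1.length - k),
          (if k + 1 ≤ pvMi w1 w2 i then ((k : Int) + 1) else 0) := by
    intro s k _
    simp only [pv_ngrams_eq w1 k, pv_ngrams_eq w2 k]
    rw [List.foldl_map]
    have hcong : ∀ (acc : Int), ∀ i ∈ List.range (w1.length - k),
        (fun (score : Int) (i : Nat) =>
          if ((w1.drop i).take (k+1)) ∈ (List.range (w2.length - k)).map (fun j => (w2.drop j).take (k+1))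
          then score + 1 * (((w1.drop i).take (k+1)).length : Int) else score) acc i
        = acc + (if k + 1 ≤ pvMi w1 w2 i then ((k : Int) + 1) else 0) := by
      intro acc i hi
      rw [List.mem_range] at hi
      beta_reduce
      have hlen : ((w1.drop i).take (k+1)).length = k + 1 := by simp; omega
      simp only [hlen, pv_mem_iff w1 w2 k i (by omega)]
      split_ifs
      · push_cast; ring
      · ring
    rw [PySem.List.foldl_congr_mem (List.range (w1.length - k)) _
          (fun (acc : Int) (i : Nat) => acc + (if k + 1 ≤ pvMi w1 w2 i then ((k : Int) + 1) else 0)) s hcong]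
    rw [PySem.List.foldl_add (g := fun i => (if k + 1 ≤ pvMi w1 w2 i then ((k : Int) + 1) else 0))]
    rfl
  rw [PySem.List.foldl_congr_mem (List.range w1.length) _
        (fun (s : Int) (k : Nat) => s + ∑ i ∈ Finset.range (w1.length - k),
          (if k + 1 ≤ pvMi w1 w2 i then ((k : Int) + 1) else 0)) 0 hbody]
  rw [PySem.List.foldl_add (g := fun k => ∑ i ∈ Finset.range (w1.length - k),
        (if k + 1 ≤ pvMi w1 w2 i then ((k : Int) + 1) else 0))]
  simp only [zero_add]
  rfl

theorem pv_gauss (m : Nat) :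
    (∑ k ∈ Finset.range m, ((k : Int) + 1)) = ((m * (m + 1) / 2 : Nat) : Int) := by
  induction m with
  | zero => simp
  | succ m ih =>
    rw [Finset.sum_range_succ, ih]
    have hr : (m + 1) * (m + 1 + 1) = m * (m + 1) + 2 * (m + 1) := by ring
    obtain ⟨t, ht⟩ := Nat.even_mul_succ_self m
    have h2 : (m + 1) * (m + 1 + 1) / 2 = m * (m + 1) / 2 + (m + 1) := by omega
    rw [h2]
    push_cast
    ring

theorem pv_tri (L m : Nat) (h : m ≤ L) :
    (∑ k ∈ Finset.range L, (if k + 1 ≤ m then ((k : Int) + 1) else 0)) =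
      ((m * (m + 1) / 2 : Nat) : Int) := by
  have hsub : Finset.range m ⊆ Finset.range L := by
    intro x hx; rw [Finset.mem_range] at *; omega
  have hvan : ∀ k ∈ Finset.range L, k ∉ Finset.range m →
      (if k + 1 ≤ m then ((k : Int) + 1) else 0) = 0 := by
    intro k _ hk; rw [Finset.mem_range] at hk; exact if_neg (by omega)
  rw [← Finset.sum_subset hsub hvan]
  rw [show (∑ x ∈ Finset.range m, if x + 1 ≤ m then ((x : Int) + 1) else 0)
        = ∑ x ∈ Finset.range m, ((x : Int) + 1) from
      Finset.sum_congr rfl (fun k hk => if_pos (by rw [Finset.mem_range] at hk; omega))]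
  exact pv_gauss m

-- ===== VERDICT (by name: the statement is the Claim_ definition above) =====
theorem ngram_words_compare_spec : Claim_equal_ngram_words_compare := by
  intro w1 w2 _
  unfold Spec_ngram_words_compare
  rw [pvA_eq_sum, pvB_eq_sum]
  have hext : ∀ k ∈ Finset.range w1.length,
      (∑ i ∈ Finset.range (w1.length - k), (if k + 1 ≤ pvMi w1 w2 i then ((k : Int) + 1) else 0))
    = ∑ i ∈ Finset.range w1.length, (if k + 1 ≤ pvMi w1 w2 i then ((k : Int) + 1) else 0) := by
    intro k _
    apply Finset.sum_subset
    · intro x hx; rw [Finset.mem_range] at *; omega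
    · intro i hi hni
      rw [Finset.mem_range] at hi
      have hnot : ¬ i < w1.length - k := fun hlt => hni (Finset.mem_range.2 hlt)
      have hle := pvMi_le w1 w2 i
      exact if_neg (by omega)
  rw [Finset.sum_congr rfl hext, Finset.sum_comm]
  apply Finset.sum_congr rfl
  intro i hi
  rw [Finset.mem_range] at hi
  exact pv_tri w1.length (pvMi w1 w2 i) (le_trans (pvMi_le w1 w2 i) (by omega))
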